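-- pv_equiv track=rewrite | github.com/irhel/Programming-Languages | pset3_empty_grammar.py | cfgempty
-- ===== SOURCE A (Python) =====
-- def terminals(grammar):
--     non_terminals = []
--     terminals = []
--     for rule in grammar:
--         non_terminals += [rule[0]]
--         terminals += rule[1]
--     terminals = [x for x in terminals if x not in non_terminals]
--     return terminals
--
-- def cfgempty(grammar, symbol, visited):
--     if type(symbol) is str: symbol = [symbol]
--     flag = True
--     for x in symbol:
--         if x not in terminals(grammar):
--             flag = False
--     if flag:
--         return symbol
--     for x in range(len(symbol)):
--         for rule in grammar:
--             if rule[0] == symbol[x] and rule[0] not in visited: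
--                 res = cfgempty(grammar, symbol[0:x] + rule[1] + symbol[x + 1 :], visited + [rule[0]])
--                 if res != None:
--                     return res
--     return None
-- ===== SOURCE B (Python) =====
-- def cfgempty(grammar, symbol, visited):
--     if type(symbol) is str:
--         symbol = [symbol]
--     heads = set()
--     bodysyms = set()
--     for h, body in grammar:
--         heads.add(h)
--         bodysyms.update(body)
--     terms = bodysyms - heads
--     stack = [(symbol, visited)]
--     while stack:
--         sym, vis = stack.pop()
--         if all(x in terms for x in sym):
--             return sym
--         frames = [
--             (sym[:x] + body + sym[x + 1:], vis + [h])
--             for x in range(len(sym))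
--             for (h, body) in grammar
--             if h == sym[x] and h not in vis
--         ]
--         stack.extend(reversed(frames))
--     return None
-- ===== Notes on version B (the rewrite author's own statement) =====
-- stated objective: faster
-- what changed: Replaces A's recursive pre-order DFS, which rebuilds terminals(grammar) inside the membership test for every symbol element of every frame, with an explicit LIFO worklist of (symbol, visited) frames and the terminal set computed once up front; children frames are pushed in reverse so the pop order reproduces A's exact left-to-right, grammar-order traversal.
import Mathlib
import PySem

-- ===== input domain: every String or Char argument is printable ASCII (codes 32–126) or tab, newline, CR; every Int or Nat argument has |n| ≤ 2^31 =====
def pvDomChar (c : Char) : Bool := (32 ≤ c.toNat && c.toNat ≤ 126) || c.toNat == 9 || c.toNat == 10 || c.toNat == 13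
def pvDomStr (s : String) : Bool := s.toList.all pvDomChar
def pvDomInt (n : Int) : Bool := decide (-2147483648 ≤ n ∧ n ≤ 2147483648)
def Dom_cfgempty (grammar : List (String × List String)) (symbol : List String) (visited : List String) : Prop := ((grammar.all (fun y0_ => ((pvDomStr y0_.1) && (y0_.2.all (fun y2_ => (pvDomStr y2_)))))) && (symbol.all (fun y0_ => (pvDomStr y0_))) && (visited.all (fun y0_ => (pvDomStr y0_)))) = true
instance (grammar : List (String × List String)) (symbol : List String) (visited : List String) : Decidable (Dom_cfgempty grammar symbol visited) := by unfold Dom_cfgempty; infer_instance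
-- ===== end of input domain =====

-- B replaces A's recursive pre-order DFS by an explicit LIFO worklist of (symbol, visited)
-- frames with the terminal set computed once up front instead of A's rebuilding of
-- terminals(grammar) per membership test (objective: faster, measured).

-- ===== PORT A =====

-- termination measure: number of grammar rules whose head is not yet visited
-- (each recursive call of A appends an unvisited head to `visited`)
def rulesLeft (grammar : List (String × List String)) (visited : List String) : Nat :=
  grammar.countP (fun r => decide (r.1 ∉ visited))

theorem rulesLeft_lt (grammar : List (String × List String)) (visited : List String)
    (r : String × List String) (hr : r ∈ grammar) (hv : r.1 ∉ visited) :
    rulesLeft grammar (visited ++ [r.1]) < rulesLeft grammar visited := by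
  induction grammar with
  | nil => simp at hr
  | cons a g ih =>
    unfold rulesLeft at *
    rcases List.mem_cons.mp hr with h | h
    · subst h
      have hle : g.countP (fun s => decide (s.1 ∉ visited ++ [r.1]))
          ≤ g.countP (fun s => decide (s.1 ∉ visited)) := by
        apply List.countP_mono_left
        intro a _ ha
        simp only [decide_eq_true_eq] at ha ⊢
        intro hm; exact ha (by simp [hm])
      simp only [List.countP_cons]
      have h1 : (decide (r.1 ∉ visited ++ [r.1]) : Bool) = false := by simp
      have h2 : (decide (r.1 ∉ visited) : Bool) = true := by simpa using hv
      rw [h1, h2]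
      simp only [Bool.false_eq_true, if_false, if_true]
      omega
    · have := ih h
      simp only [List.countP_cons] at *
      by_cases hm : a.1 ∈ visited
      · have h1 : (decide (a.1 ∉ visited ++ [r.1]) : Bool) = false := by simp [hm]
        have h2 : (decide (a.1 ∉ visited) : Bool) = false := by simpa using hm
        rw [h1, h2]
        simp only [Bool.false_eq_true, if_false]
        omega
      · have h2 : (decide (a.1 ∉ visited) : Bool) = true := by simpa using hm
        rw [h2]
        cases hb : (decide (a.1 ∉ visited ++ [r.1]) : Bool) <;>
          simp only [Bool.false_eq_true, if_false, if_true] <;> omega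

-- terminals(grammar): body symbols that are not heads (A's helper, literally)
def terminalsA (grammar : List (String × List String)) : List String :=
  let non_terminals := grammar.foldl (fun acc rule => acc ++ [rule.1]) []
  let terms := grammar.foldl (fun acc rule => acc ++ rule.2) []
  terms.filter (fun x => decide (x ∉ non_terminals))

mutual
-- cfgempty: flag pass over symbol, then `for x in range(len(symbol)): for rule in grammar: …`
def cfgempty (grammar : List (String × List String)) (symbol : List String) (visited : List String) : Option (List String) :=
  let flag := symbol.foldl (fun f x => if x ∈ terminalsA grammar then f else false) true
  if flag then some symbol
  else cfgTryPos grammar symbol visited (List.range symbol.length)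
termination_by (rulesLeft grammar visited, 2, 0)

def cfgTryPos (grammar : List (String × List String)) (symbol : List String) (visited : List String) (xs : List Nat) : Option (List String) :=
  match xs with
  | [] => none
  | x :: rest =>
    match cfgTryRules grammar symbol visited x grammar.attach with
    | some res => some res
    | none => cfgTryPos grammar symbol visited rest
termination_by (rulesLeft grammar visited, 1, xs.length)

def cfgTryRules (grammar : List (String × List String)) (symbol : List String) (visited : List String) (x : Nat) (rules : List {r // r ∈ grammar}) : Option (List String) :=
  match rules with
  | [] => none
  | rule :: rest =>
    if rule.val.1 = symbol.getD x "" ∧ rule.val.1 ∉ visited then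
      match cfgempty grammar (symbol.take x ++ rule.val.2 ++ symbol.drop (x + 1)) (visited ++ [rule.val.1]) with
      | some res => some res
      | none => cfgTryRules grammar symbol visited x rest
    else cfgTryRules grammar symbol visited x rest
termination_by (rulesLeft grammar visited, 0, rules.length)
decreasing_by
  · exact Prod.Lex.left _ _ (rulesLeft_lt grammar visited rule.val rule.property (by tauto))
  · apply Prod.Lex.right; apply Prod.Lex.right; simp
  · apply Prod.Lex.right; apply Prod.Lex.right; simp
end

-- ===== PORT B =====

-- terms = (all body symbols) minus (all heads), built once as Python sets
def cfgTerms (grammar : List (String × List String)) : PySem.Set String :=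
  let hb := grammar.foldl
    (fun (p : PySem.Set String × PySem.Set String) r => (PySem.Set.add p.1 r.1, PySem.Set.update p.2 r.2))
    (PySem.Set.empty, PySem.Set.empty)
  PySem.Set.diff hb.2 hb.1

-- the successor frames of one frame, position-major, grammar order (Source B's comprehension)
def cfgSuccs (grammar : List (String × List String)) (sym : List String) (vis : List String) : List (List String × List String) :=
  (List.range sym.length).flatMap (fun x =>
    (grammar.filter (fun r => decide (r.1 = sym.getD x "" ∧ r.1 ∉ vis))).map
      (fun r => (sym.take x ++ r.2 ++ sym.drop (x + 1), vis ++ [r.1])))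

-- the while loop over the LIFO stack (list head = top of stack; `children ++ rest`
-- = Python's stack.extend(reversed(frames)) followed by pops from the end)
def cfgAltLoop (grammar : List (String × List String)) (terms : PySem.Set String) (stack : List (List String × List String)) : Option (List String) :=
  match stack with
  | [] => none
  | (sym, vis) :: rest =>
    if sym.all (fun x => PySem.Set.contains terms x) then some sym
    else cfgAltLoop grammar terms (cfgSuccs grammar sym vis ++ rest)
termination_by ((stack.map (fun f => rulesLeft grammar f.2) : Multiset Nat))
decreasing_by
  refine ⟨(rest.map (fun f => rulesLeft grammar f.2) : Multiset Nat),
    ((cfgSuccs grammar sym vis).map (fun f => rulesLeft grammar f.2) : Multiset Nat),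
    {rulesLeft grammar vis}, by simp, ?_, ?_, ?_⟩
  · simp only [List.map_append, ← Multiset.coe_add]
    exact Multiset.coe_eq_coe.mpr List.perm_append_comm
  · simp [add_comm]
  intro y hy
  refine ⟨rulesLeft grammar vis, by simp, ?_⟩
  simp only [Multiset.mem_coe, List.mem_map] at hy
  obtain ⟨f, hf, rfl⟩ := hy
  simp only [cfgSuccs, List.mem_flatMap, List.mem_map, List.mem_filter] at hf
  obtain ⟨x, -, r, ⟨hrg, hcond⟩, rfl⟩ := hf
  simp only [decide_eq_true_eq] at hcond
  exact rulesLeft_lt grammar vis r hrg hcond.2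

def cfgempty_alt (grammar : List (String × List String)) (symbol : List String) (visited : List String) : Option (List String) :=
  cfgAltLoop grammar (cfgTerms grammar) [(symbol, visited)]

-- ===== PRECONDITION & SPEC =====
def Spec_cfgempty (grammar : List (String × List String)) (symbol : List String) (visited : List String) (out : Option (List String)) : Prop := out = cfgempty_alt grammar symbol visited
instance (grammar : List (String × List String)) (symbol : List String) (visited : List String) (out : Option (List String)) : Decidable (Spec_cfgempty grammar symbol visited out) := by unfold Spec_cfgempty; infer_instance

-- ===== CLAIM (what is proved, stated in full; the proofs are below) =====
def Claim_equal_cfgempty : Prop := ∀ (grammar : List (String × List String)) (symbol : List String) (visited : List String), Dom_cfgempty grammar symbol visited → Spec_cfgempty grammar symbol visited (cfgempty grammar symbol visited)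

-- ===== LEMMAS AND PROOFS =====

theorem mem_hb_fold (g : List (String × List String)) (p : PySem.Set String × PySem.Set String) (y : String) :
    (y ∈ (g.foldl (fun p r => (PySem.Set.add p.1 r.1, PySem.Set.update p.2 r.2)) p).1 ↔ y ∈ p.1 ∨ ∃ r ∈ g, y = r.1)
    ∧ (y ∈ (g.foldl (fun p r => (PySem.Set.add p.1 r.1, PySem.Set.update p.2 r.2)) p).2 ↔ y ∈ p.2 ∨ ∃ r ∈ g, y ∈ r.2) := by
  induction g generalizing p with
  | nil => simp
  | cons a g ih =>
    simp only [List.foldl_cons]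
    constructor
    · rw [(ih _).1]
      simp [PySem.Set.mem_add]
      tauto
    · rw [(ih _).2]
      simp [PySem.Set.mem_update]
      tauto

theorem mem_heads_fold (g : List (String × List String)) (acc : List String) (y : String) :
    y ∈ g.foldl (fun acc rule => acc ++ [rule.1]) acc ↔ y ∈ acc ∨ ∃ r ∈ g, y = r.1 := by
  induction g generalizing acc with
  | nil => simp
  | cons a g ih =>
    simp only [List.foldl_cons, ih]
    simp
    tauto

theorem mem_bodies_fold (g : List (String × List String)) (acc : List String) (y : String) :
    y ∈ g.foldl (fun acc rule => acc ++ rule.2) acc ↔ y ∈ acc ∨ ∃ r ∈ g, y ∈ r.2 := by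
  induction g generalizing acc with
  | nil => simp
  | cons a g ih =>
    simp only [List.foldl_cons, ih]
    simp
    tauto

theorem mem_cfgTerms (grammar : List (String × List String)) (x : String) :
    (PySem.Set.contains (cfgTerms grammar) x = true) ↔ x ∈ terminalsA grammar := by
  have h1 := (mem_hb_fold grammar (PySem.Set.empty, PySem.Set.empty) x).1
  have h2 := (mem_hb_fold grammar (PySem.Set.empty, PySem.Set.empty) x).2
  have h3 := mem_heads_fold grammar [] x
  have h4 := mem_bodies_fold grammar [] x
  simp only [cfgTerms, terminalsA, PySem.Set.contains_iff, PySem.Set.mem_diff, List.mem_filter,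
    decide_eq_true_eq]
  rw [h1, h2, h3, h4]
  simp [PySem.Set.empty]

theorem flag_eq_all (grammar : List (String × List String)) (symbol : List String) (b : Bool) :
    symbol.foldl (fun f x => if x ∈ terminalsA grammar then f else false) b
      = (b && symbol.all (fun x => decide (x ∈ terminalsA grammar))) := by
  induction symbol generalizing b with
  | nil => simp
  | cons y ys ih =>
    simp only [List.foldl_cons, List.all_cons, ih]
    by_cases h : y ∈ terminalsA grammar <;> simp [h]

theorem cfgTryRules_eq (grammar : List (String × List String)) (symbol visited : List String) (x : Nat)
    (rules : List {r // r ∈ grammar}) :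
    cfgTryRules grammar symbol visited x rules
      = (((rules.map Subtype.val).filter (fun r => decide (r.1 = symbol.getD x "" ∧ r.1 ∉ visited))).map
          (fun r => (symbol.take x ++ r.2 ++ symbol.drop (x + 1), visited ++ [r.1]))).findSome?
          (fun f => cfgempty grammar f.1 f.2) := by
  induction rules with
  | nil => simp [cfgTryRules]
  | cons rule rest ih =>
    rw [cfgTryRules]
    simp only [List.map_cons]
    by_cases h : rule.val.1 = symbol.getD x "" ∧ rule.val.1 ∉ visited
    · rw [if_pos h, List.filter_cons]
      rw [show (decide (rule.val.1 = symbol.getD x "" ∧ rule.val.1 ∉ visited)) = true from decide_eq_true h]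
      rw [if_pos rfl, List.map_cons, List.findSome?_cons]
      cases hres : cfgempty grammar (symbol.take x ++ rule.val.2 ++ symbol.drop (x + 1)) (visited ++ [rule.val.1]) with
      | some r => simp
      | none => exact ih
    · rw [if_neg h, List.filter_cons]
      rw [show (decide (rule.val.1 = symbol.getD x "" ∧ rule.val.1 ∉ visited)) = false from decide_eq_false h]
      rw [if_neg (by simp)]
      exact ih

theorem cfgTryPos_eq (grammar : List (String × List String)) (symbol visited : List String)
    (xs : List Nat) :
    cfgTryPos grammar symbol visited xs
      = (xs.flatMap (fun x =>
          ((grammar.filter (fun r => decide (r.1 = symbol.getD x "" ∧ r.1 ∉ visited))).map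
            (fun r => (symbol.take x ++ r.2 ++ symbol.drop (x + 1), visited ++ [r.1]))))).findSome?
          (fun f => cfgempty grammar f.1 f.2) := by
  induction xs with
  | nil => simp [cfgTryPos]
  | cons x rest ih =>
    rw [cfgTryPos, List.flatMap_cons, List.findSome?_append, cfgTryRules_eq]
    simp only [List.attach_map_subtype_val]
    cases h : (((grammar.filter (fun r => decide (r.1 = symbol.getD x "" ∧ r.1 ∉ visited))).map
        (fun r => (symbol.take x ++ r.2 ++ symbol.drop (x + 1), visited ++ [r.1]))).findSome?
        (fun f => cfgempty grammar f.1 f.2)) <;> simp [ih]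

theorem cfgempty_char (grammar : List (String × List String)) (symbol visited : List String) :
    cfgempty grammar symbol visited
      = if symbol.all (fun x => decide (x ∈ terminalsA grammar)) then some symbol
        else (cfgSuccs grammar symbol visited).findSome? (fun f => cfgempty grammar f.1 f.2) := by
  rw [cfgempty, flag_eq_all, Bool.true_and, cfgTryPos_eq, cfgSuccs]

theorem cfgAltLoop_eq (grammar : List (String × List String)) (terms : PySem.Set String)
    (hterms : ∀ x, (PySem.Set.contains terms x = true) ↔ x ∈ terminalsA grammar)
    (stack : List (List String × List String)) :
    cfgAltLoop grammar terms stack = stack.findSome? (fun f => cfgempty grammar f.1 f.2) := by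
  induction stack using cfgAltLoop.induct (grammar := grammar) (terms := terms) with
  | case1 => simp [cfgAltLoop]
  | case2 sym vis rest hall =>
    have hall' : (sym.all fun x => decide (x ∈ terminalsA grammar)) = true := by
      simp only [List.all_eq_true, decide_eq_true_eq] at hall ⊢
      exact fun x hx => (hterms x).mp (hall x hx)
    rw [cfgAltLoop, if_pos hall, List.findSome?_cons]
    simp [cfgempty_char, hall']
  | case3 sym vis rest hall ih =>
    have hall' : ¬ (sym.all fun x => decide (x ∈ terminalsA grammar)) = true := by
      intro hc
      apply hall
      simp only [List.all_eq_true, decide_eq_true_eq] at hc ⊢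
      exact fun x hx => (hterms x).mpr (hc x hx)
    rw [cfgAltLoop, if_neg hall, ih, List.findSome?_append, List.findSome?_cons, cfgempty_char,
      if_neg hall']
    cases (cfgSuccs grammar sym vis).findSome? (fun f => cfgempty grammar f.1 f.2) <;> rfl

-- ===== VERDICT (by name: the statement is the Claim_ definition above) =====
theorem cfgempty_spec : Claim_equal_cfgempty := by
  intro grammar symbol visited _
  unfold Spec_cfgempty cfgempty_alt
  rw [cfgAltLoop_eq grammar _ (mem_cfgTerms grammar)]
  cases h : cfgempty grammar symbol visited <;> simp [h]
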